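-- pv_equiv track=rewrite | github.com/Eriumsss/Conquest3DViewport | dev/Vespucci/Project/Final/lotr/ZeroEnginePrototype/ZeroEngine/Engine/wwise/cracking/HashCracking/scripts/sc/reorg/organize_extracted.py | categorize_by_name
-- ===== SOURCE A (Python) =====
-- def categorize_by_name(event_name):
--     """Categorize an event by its name"""
--     name_lower = event_name.lower()
--
--     # Voice/dialogue
--     if any(x in name_lower for x in ['vo', 'voice', 'dialogue', 'taunt', 'cheer', 'vocal', 'kill', 'death', 'pain', 'effort', 'grunt', 'yell', 'scream']):
--         if 'kill' in name_lower:
--             return 'voice/combat/kills'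
--         elif 'taunt' in name_lower or 'cheer' in name_lower:
--             return 'voice/combat/taunts'
--         elif 'death' in name_lower or 'pain' in name_lower or 'grunt' in name_lower:
--             return 'voice/combat/pain'
--         else:
--             return 'voice/dialogue'
--
--     # Music
--     if any(x in name_lower for x in ['music', 'theme', 'ambient_music', 'score', 'soundtrack', 'bgm']):
--         return 'music'
--
--     # Weapons
--     if any(x in name_lower for x in ['sword', 'blade', 'swing', 'slash', 'stab', 'arrow', 'bow', 'axe', 'spear', 'weapon', 'ranged_attack']):
--         if 'impact' in name_lower:
--             return 'sfx/weapons/impacts'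
--         elif 'charge' in name_lower or 'release' in name_lower:
--             return 'sfx/weapons/ranged'
--         else:
--             return 'sfx/weapons/swings'
--
--     # Combat
--     if any(x in name_lower for x in ['impact', 'hit', 'block', 'parry', 'attack', 'damage', 'grab']):
--         if 'block' in name_lower or 'parry' in name_lower:
--             return 'sfx/combat/blocks'
--         elif 'wood' in name_lower or 'metal' in name_lower or 'stone' in name_lower:
--             return 'sfx/combat/impacts_material'
--         else:
--             return 'sfx/combat/impacts'
--
--     # Magic/abilities
--     if any(x in name_lower for x in ['ability', 'magic', 'spell', 'firewall', 'lightning', 'heal', 'power']):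
--         return 'sfx/abilities'
--
--     # Movement
--     if any(x in name_lower for x in ['footstep', 'walk', 'run', 'jump', 'land', 'movement']):
--         return 'sfx/movement'
--
--     # UI
--     if any(x in name_lower for x in ['ui', 'menu', 'button', 'click', 'select', 'hover', 'transition', 'state', 'cp_transition']):
--         return 'sfx/ui'
--
--     # Environment
--     if any(x in name_lower for x in ['ambient', 'wind', 'water', 'fire', 'rain', 'thunder', 'environment']):
--         return 'ambient/environment'
--
--     # Creatures
--     if any(x in name_lower for x in ['creature', 'monster', 'beast', 'orc', 'troll', 'dragon']):
--         return 'voice/creatures'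
--
--     # Character types
--     if any(x in name_lower for x in ['hero', 'scout', 'boss', 'normal', 'human']):
--         return 'voice/characters'
--
--     return 'uncategorized'
-- ===== SOURCE B (Python) =====
-- # B: instead of re-scanning the name for every substring test as the if/elif
-- # tree does, do ONE positional sweep over the lowered name that marks which
-- # keywords occur anywhere (a naive multi-pattern matcher building a matched
-- # set), then classify by a pure lookup of that set in an ordered rule table.
--
-- RULES = [
--     (['vo', 'voice', 'dialogue', 'taunt', 'cheer', 'vocal', 'kill', 'death',
--       'pain', 'effort', 'grunt', 'yell', 'scream'],
--      [(['kill'], 'voice/combat/kills'),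
--       (['taunt', 'cheer'], 'voice/combat/taunts'),
--       (['death', 'pain', 'grunt'], 'voice/combat/pain')],
--      'voice/dialogue'),
--     (['music', 'theme', 'ambient_music', 'score', 'soundtrack', 'bgm'],
--      [], 'music'),
--     (['sword', 'blade', 'swing', 'slash', 'stab', 'arrow', 'bow', 'axe',
--       'spear', 'weapon', 'ranged_attack'],
--      [(['impact'], 'sfx/weapons/impacts'),
--       (['charge', 'release'], 'sfx/weapons/ranged')],
--      'sfx/weapons/swings'),
--     (['impact', 'hit', 'block', 'parry', 'attack', 'damage', 'grab'],
--      [(['block', 'parry'], 'sfx/combat/blocks'),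
--       (['wood', 'metal', 'stone'], 'sfx/combat/impacts_material')],
--      'sfx/combat/impacts'),
--     (['ability', 'magic', 'spell', 'firewall', 'lightning', 'heal', 'power'],
--      [], 'sfx/abilities'),
--     (['footstep', 'walk', 'run', 'jump', 'land', 'movement'],
--      [], 'sfx/movement'),
--     (['ui', 'menu', 'button', 'click', 'select', 'hover', 'transition',
--       'state', 'cp_transition'],
--      [], 'sfx/ui'),
--     (['ambient', 'wind', 'water', 'fire', 'rain', 'thunder', 'environment'],
--      [], 'ambient/environment'),
--     (['creature', 'monster', 'beast', 'orc', 'troll', 'dragon'],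
--      [], 'voice/creatures'),
--     (['hero', 'scout', 'boss', 'normal', 'human'],
--      [], 'voice/characters'),
-- ]
--
-- # every substring mentioned anywhere in RULES
-- KEYWORDS = [
--     'vo', 'voice', 'dialogue', 'taunt', 'cheer', 'vocal', 'kill', 'death',
--     'pain', 'effort', 'grunt', 'yell', 'scream',
--     'music', 'theme', 'ambient_music', 'score', 'soundtrack', 'bgm',
--     'sword', 'blade', 'swing', 'slash', 'stab', 'arrow', 'bow', 'axe',
--     'spear', 'weapon', 'ranged_attack', 'impact', 'charge', 'release',
--     'hit', 'block', 'parry', 'attack', 'damage', 'grab',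
--     'wood', 'metal', 'stone',
--     'ability', 'magic', 'spell', 'firewall', 'lightning', 'heal', 'power',
--     'footstep', 'walk', 'run', 'jump', 'land', 'movement',
--     'ui', 'menu', 'button', 'click', 'select', 'hover', 'transition',
--     'state', 'cp_transition',
--     'ambient', 'wind', 'water', 'fire', 'rain', 'thunder', 'environment',
--     'creature', 'monster', 'beast', 'orc', 'troll', 'dragon',
--     'hero', 'scout', 'boss', 'normal', 'human',
-- ]
--
--
-- def categorize_by_name(event_name):
--     """Categorize an event by its name"""
--     nl = event_name.lower()
--     # one sweep over the positions of the name: mark every keyword that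
--     # starts at some position
--     found = set()
--     for i in range(len(nl) + 1):
--         for k in KEYWORDS:
--             if nl.startswith(k, i):
--                 found.add(k)
--     # classification is now a pure lookup of the matched set in the table
--     for triggers, subrules, default in RULES:
--         if any(k in found for k in triggers):
--             for conds, cat in subrules:
--                 if any(k in found for k in conds):
--                     return cat
--             return default
--     return 'uncategorized'
-- ===== Notes on version B (the rewrite author's own statement) =====
-- stated objective: alternative
-- what changed: The nested if/elif tree of repeated substring scans is replaced by one positional sweep over the lowered name that builds the set of all matched keywords (naive multi-pattern matching), followed by a pure lookup of that set in an ordered rule table.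
import Mathlib
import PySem

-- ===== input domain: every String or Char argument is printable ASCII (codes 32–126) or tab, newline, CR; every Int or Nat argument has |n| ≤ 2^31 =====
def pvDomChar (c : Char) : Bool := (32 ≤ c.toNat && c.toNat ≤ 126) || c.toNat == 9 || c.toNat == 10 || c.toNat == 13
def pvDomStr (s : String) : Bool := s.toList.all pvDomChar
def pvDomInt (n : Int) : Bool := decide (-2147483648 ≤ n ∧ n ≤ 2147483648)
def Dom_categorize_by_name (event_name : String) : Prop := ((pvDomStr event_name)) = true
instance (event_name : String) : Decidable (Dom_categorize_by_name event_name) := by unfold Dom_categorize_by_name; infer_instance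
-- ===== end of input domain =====

-- B replaces A's nested if/elif tree of repeated substring scans by one positional sweep
-- collecting the set of matched keywords, then a pure lookup of that set in an ordered
-- rule table (alternative decomposition, same asymptotic cost).


-- ===== PORT A =====
def categorize_by_name (event_name : String) : String :=
  let nl := PySem.Str.lower event_name
  if (["vo", "voice", "dialogue", "taunt", "cheer", "vocal", "kill", "death", "pain",
      "effort", "grunt", "yell", "scream"]).any (fun x => PySem.Str.isIn x nl) then
    if PySem.Str.isIn "kill" nl then "voice/combat/kills"
    else if PySem.Str.isIn "taunt" nl || PySem.Str.isIn "cheer" nl then "voice/combat/taunts"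
    else if PySem.Str.isIn "death" nl || PySem.Str.isIn "pain" nl || PySem.Str.isIn "grunt" nl then
      "voice/combat/pain"
    else "voice/dialogue"
  else if (["music", "theme", "ambient_music", "score", "soundtrack", "bgm"]).any
      (fun x => PySem.Str.isIn x nl) then "music"
  else if (["sword", "blade", "swing", "slash", "stab", "arrow", "bow", "axe", "spear",
      "weapon", "ranged_attack"]).any (fun x => PySem.Str.isIn x nl) then
    if PySem.Str.isIn "impact" nl then "sfx/weapons/impacts"
    else if PySem.Str.isIn "charge" nl || PySem.Str.isIn "release" nl then "sfx/weapons/ranged"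
    else "sfx/weapons/swings"
  else if (["impact", "hit", "block", "parry", "attack", "damage", "grab"]).any
      (fun x => PySem.Str.isIn x nl) then
    if PySem.Str.isIn "block" nl || PySem.Str.isIn "parry" nl then "sfx/combat/blocks"
    else if PySem.Str.isIn "wood" nl || PySem.Str.isIn "metal" nl || PySem.Str.isIn "stone" nl then
      "sfx/combat/impacts_material"
    else "sfx/combat/impacts"
  else if (["ability", "magic", "spell", "firewall", "lightning", "heal", "power"]).any
      (fun x => PySem.Str.isIn x nl) then "sfx/abilities"
  else if (["footstep", "walk", "run", "jump", "land", "movement"]).any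
      (fun x => PySem.Str.isIn x nl) then "sfx/movement"
  else if (["ui", "menu", "button", "click", "select", "hover", "transition", "state",
      "cp_transition"]).any (fun x => PySem.Str.isIn x nl) then "sfx/ui"
  else if (["ambient", "wind", "water", "fire", "rain", "thunder", "environment"]).any
      (fun x => PySem.Str.isIn x nl) then "ambient/environment"
  else if (["creature", "monster", "beast", "orc", "troll", "dragon"]).any
      (fun x => PySem.Str.isIn x nl) then "voice/creatures"
  else if (["hero", "scout", "boss", "normal", "human"]).any
      (fun x => PySem.Str.isIn x nl) then "voice/characters"
  else "uncategorized"

-- ===== PORT B =====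
-- the ordered rule table: (trigger substrings, sub-rules (conditions, category), default)
def pvRules : List (List String × List (List String × String) × String) :=
  [(["vo", "voice", "dialogue", "taunt", "cheer", "vocal", "kill", "death", "pain",
     "effort", "grunt", "yell", "scream"],
    [(["kill"], "voice/combat/kills"),
     (["taunt", "cheer"], "voice/combat/taunts"),
     (["death", "pain", "grunt"], "voice/combat/pain")],
    "voice/dialogue"),
   (["music", "theme", "ambient_music", "score", "soundtrack", "bgm"], [], "music"),
   (["sword", "blade", "swing", "slash", "stab", "arrow", "bow", "axe", "spear",
     "weapon", "ranged_attack"],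
    [(["impact"], "sfx/weapons/impacts"),
     (["charge", "release"], "sfx/weapons/ranged")],
    "sfx/weapons/swings"),
   (["impact", "hit", "block", "parry", "attack", "damage", "grab"],
    [(["block", "parry"], "sfx/combat/blocks"),
     (["wood", "metal", "stone"], "sfx/combat/impacts_material")],
    "sfx/combat/impacts"),
   (["ability", "magic", "spell", "firewall", "lightning", "heal", "power"], [], "sfx/abilities"),
   (["footstep", "walk", "run", "jump", "land", "movement"], [], "sfx/movement"),
   (["ui", "menu", "button", "click", "select", "hover", "transition", "state",
     "cp_transition"], [], "sfx/ui"),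
   (["ambient", "wind", "water", "fire", "rain", "thunder", "environment"], [],
    "ambient/environment"),
   (["creature", "monster", "beast", "orc", "troll", "dragon"], [], "voice/creatures"),
   (["hero", "scout", "boss", "normal", "human"], [], "voice/characters")]

-- every substring mentioned anywhere in the table
def pvKeywords : List String :=
  ["vo", "voice", "dialogue", "taunt", "cheer", "vocal", "kill", "death",
   "pain", "effort", "grunt", "yell", "scream",
   "music", "theme", "ambient_music", "score", "soundtrack", "bgm",
   "sword", "blade", "swing", "slash", "stab", "arrow", "bow", "axe",
   "spear", "ranged_attack", "weapon", "impact", "charge", "release",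
   "hit", "block", "parry", "attack", "damage", "grab",
   "wood", "metal", "stone",
   "ability", "magic", "spell", "firewall", "lightning", "heal", "power",
   "footstep", "walk", "run", "jump", "land", "movement",
   "ui", "menu", "button", "click", "select", "hover", "transition",
   "state", "cp_transition",
   "ambient", "wind", "water", "fire", "rain", "thunder", "environment",
   "creature", "monster", "beast", "orc", "troll", "dragon",
   "hero", "scout", "boss", "normal", "human"]

-- the positional sweep: for i in range(len(nl)+1): for k in KEYWORDS: if nl.startswith(k, i): found.add(k)
-- (Python's nl.startswith(k, i) with 0 ≤ i is the prefix test on nl[i:], ported as the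
-- prefix test on nl.drop i.toNat — exact for the nonnegative i produced by range)
def pvScan (nl : List Char) : PySem.Set String :=
  (PySem.List.pyRange 0 (nl.length + 1) 1).foldl
    (fun acc i =>
      pvKeywords.foldl
        (fun acc k =>
          if PySem.Chars.startswith (nl.drop i.toNat) k.toList then PySem.Set.add acc k else acc)
        acc)
    PySem.Set.empty

-- any(k in found for k in subs)
def pvHit (found : PySem.Set String) (subs : List String) : Bool :=
  subs.any (fun k => PySem.Set.contains found k)

-- inner loop: first matching sub-rule, else the rule's default
def pvResolve (found : PySem.Set String) (subs : List (List String × String)) (dflt : String) : String :=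
  match subs with
  | [] => dflt
  | (conds, cat) :: rest => if pvHit found conds then cat else pvResolve found rest dflt

-- outer loop over the rule table
def pvWalk (found : PySem.Set String) : List (List String × List (List String × String) × String) → String
  | [] => "uncategorized"
  | (trig, subs, dflt) :: rest =>
      if pvHit found trig then pvResolve found subs dflt else pvWalk found rest

def categorize_by_name_alt (event_name : String) : String :=
  pvWalk (pvScan (PySem.Str.lower event_name).toList) pvRules

-- ===== PRECONDITION & SPEC =====
def Spec_categorize_by_name (event_name : String) (out : String) : Prop := out = categorize_by_name_alt event_name
instance (event_name : String) (out : String) : Decidable (Spec_categorize_by_name event_name out) := by unfold Spec_categorize_by_name; infer_instance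

-- ===== CLAIM (what is proved, stated in full; the proofs are below) =====
def Claim_equal_categorize_by_name : Prop := ∀ (event_name : String), Dom_categorize_by_name event_name → Spec_categorize_by_name event_name (categorize_by_name event_name)

-- ===== LEMMAS AND PROOFS =====

-- membership after the inner keyword loop at one position
theorem pv_mem_inner (cs : List Char) (ks : List String) (acc : PySem.Set String) (x : String) :
    x ∈ ks.foldl
        (fun a k => if PySem.Chars.startswith cs k.toList then PySem.Set.add a k else a) acc
    ↔ x ∈ acc ∨ (x ∈ ks ∧ PySem.Chars.startswith cs x.toList) := by
  induction ks generalizing acc with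
  | nil => simp
  | cons k ks ih =>
    simp only [List.foldl_cons]
    rw [ih]
    by_cases h : PySem.Chars.startswith cs k.toList
    · simp only [h, if_pos, PySem.Set.mem_add, List.mem_cons]
      constructor
      · rintro ((hx | rfl) | ⟨hk, hs⟩)
        · exact Or.inl hx
        · exact Or.inr ⟨Or.inl rfl, h⟩
        · exact Or.inr ⟨Or.inr hk, hs⟩
      · rintro (hx | ⟨(rfl | hk), hs⟩)
        · exact Or.inl (Or.inl hx)
        · exact Or.inl (Or.inr rfl)
        · exact Or.inr ⟨hk, hs⟩
    · simp only [h, List.mem_cons]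
      constructor
      · rintro (hx | ⟨hk, hs⟩)
        · exact Or.inl hx
        · exact Or.inr ⟨Or.inr hk, hs⟩
      · rintro (hx | ⟨(rfl | hk), hs⟩)
        · exact Or.inl hx
        · exact absurd hs (by simpa using h)
        · exact Or.inr ⟨hk, hs⟩

-- membership after the whole sweep over a list of positions
theorem pv_mem_outer (nl : List Char) (is : List Int) (acc : PySem.Set String) (x : String) :
    x ∈ is.foldl
        (fun acc i =>
          pvKeywords.foldl
            (fun acc k =>
              if PySem.Chars.startswith (nl.drop i.toNat) k.toList then PySem.Set.add acc k else acc)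
            acc) acc
    ↔ x ∈ acc ∨ ∃ i ∈ is, x ∈ pvKeywords ∧ PySem.Chars.startswith (nl.drop i.toNat) x.toList := by
  induction is generalizing acc with
  | nil => simp
  | cons i is ih =>
    simp only [List.foldl_cons]
    rw [ih, pv_mem_inner]
    simp only [List.mem_cons]
    constructor
    · rintro ((hx | ⟨hk, hs⟩) | ⟨j, hj, hk, hs⟩)
      · exact Or.inl hx
      · exact Or.inr ⟨i, Or.inl rfl, hk, hs⟩
      · exact Or.inr ⟨j, Or.inr hj, hk, hs⟩
    · rintro (hx | ⟨j, (rfl | hj), hk, hs⟩)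
      · exact Or.inl (Or.inl hx)
      · exact Or.inl (Or.inr ⟨hk, hs⟩)
      · exact Or.inr ⟨j, hj, hk, hs⟩

-- the sweep finds exactly the keywords occurring as substrings
theorem pv_mem_scan (nl : List Char) (x : String) :
    x ∈ pvScan nl ↔ x ∈ pvKeywords ∧ PySem.Chars.isIn x.toList nl = true := by
  unfold pvScan
  rw [pv_mem_outer]
  rw [← PySem.Chars.exists_prefix_drop_iff_isIn]
  simp only [PySem.Set.empty, List.not_mem_nil, false_or]
  constructor
  · rintro ⟨i, _, hk, hs⟩
    exact ⟨hk, i.toNat, (PySem.Chars.startswith_iff _ _).mp hs⟩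
  · rintro ⟨hk, j, hj⟩
    by_cases hle : j ≤ nl.length
    · refine ⟨(j : Int), ?_, hk, (PySem.Chars.startswith_iff _ _).mpr (by simpa using hj)⟩
      have : (j : Int) ∈ PySem.List.pyRange 0 (nl.length + 1) 1 := by
        rw [PySem.List.mem_pyRange_one]
        omega
      simpa using this
    · -- position past the end: the drop is [] there and also at len, so len works
      rw [not_le] at hle
      have hnil : nl.drop j = [] := List.drop_eq_nil_of_le (le_of_lt hle)
      refine ⟨(nl.length : Int), ?_, hk, (PySem.Chars.startswith_iff _ _).mpr ?_⟩
      · have : (nl.length : Int) ∈ PySem.List.pyRange 0 (nl.length + 1) 1 := by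
          rw [PySem.List.mem_pyRange_one]
          omega
        exact this
      · simp only [Int.toNat_natCast, List.drop_length]
        rw [hnil] at hj
        simp at hj
        simp [hj]
  
-- contains on the scanned set, unconditionally
theorem pv_contains_scan (nl : List Char) (k : String) :
    PySem.Set.contains (pvScan nl) k
      = (pvKeywords.contains k && PySem.Chars.isIn k.toList nl) := by
  rw [Bool.eq_iff_iff]
  simp only [PySem.Set.contains_eq_listContains, List.contains_iff_mem, Bool.and_eq_true]
  exact pv_mem_scan nl k

-- ===== VERDICT (by name: the statement is the Claim_ definition above) =====
theorem categorize_by_name_spec : Claim_equal_categorize_by_name := by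
  intro e _
  unfold Spec_categorize_by_name categorize_by_name categorize_by_name_alt
  simp only [pvRules, pvWalk, pvResolve, pvHit, List.any_cons, List.any_nil,
    pv_contains_scan, pvKeywords, List.contains_cons, List.contains_nil, String.reduceBEq,
    PySem.Str.isIn_eq, Bool.or_false, Bool.false_or, Bool.true_and, Bool.or_assoc]
  rfl
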